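-- pv_equiv track=rewrite | github.com/precious-05/5th_Sem_Labs | OS/.history/deadlock/banker_20251222123322.py | detect_deadlock
-- ===== SOURCE A (Python) =====
-- def detect_deadlock(available, allocated, request):
--
--     num_processes = len(allocated)
--     num_resources = len(available)
--
--     work = available.copy()
--     finish = [False] * num_processes
--
--     while True:
--         progress = False
--
--         for i in range(num_processes):
--
--             if finish[i] == False:
--
--                 can_finish = True
--
--                 for j in range(num_resources):
--
--                     # Dry run example:
--                     # request[3][1] <= work[1]
--
--                     if request[i][j] > work[j]:
--                         can_finish = False
--                         break
--
--                 if can_finish: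
--
--                     # Release resources
--                     for j in range(num_resources):
--                         work[j] += allocated[i][j]
--
--                     finish[i] = True
--                     progress = True
--
--         if not progress:
--             break
--
--     # Processes which could not finish are deadlocked
--     deadlocked = []
--
--     for i in range(num_processes):
--         if finish[i] == False:
--             deadlocked.append(i)
--
--     return deadlocked
-- ===== SOURCE B (Python) =====
-- def detect_deadlock(available, allocated, request):
--     # Event-driven detection: per-process unsatisfied-resource counters (deficit)
--     # plus a per-resource reverse index of blocked processes (waiters); only
--     # waiters of a resource whose amount just grew are re-examined, and a ready
--     # queue drives the releases -- no repeated full sweeps over all processes.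
--     P, R = len(allocated), len(available)
--     work = available.copy()
--     deficit = [0] * P
--     waiters = [[] for _ in range(R)]
--     for i in range(P):
--         for j in range(R):
--             if request[i][j] > work[j]:
--                 deficit[i] += 1
--                 waiters[j].append(i)
--     ready = [i for i in range(P) if deficit[i] == 0]
--     while ready:
--         i = ready.pop()
--         for j in range(R):
--             if allocated[i][j]:
--                 work[j] += allocated[i][j]
--                 still = []
--                 for k in waiters[j]:
--                     if request[k][j] <= work[j]:
--                         deficit[k] -= 1
--                         if deficit[k] == 0:
--                             ready.append(k)
--                     else:
--                         still.append(k)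
--                 waiters[j] = still
--     return [i for i in range(P) if deficit[i]]
-- ===== Notes on version B (the rewrite author's own statement) =====
-- stated objective: alternative
-- what changed: replaces A's repeated full sweeps over all P processes (rechecking every request row against work each round) by an event-driven scheme: per-process unsatisfied-resource counters and a per-resource reverse index of blocked processes, so only waiters of a resource whose amount just grew are re-examined and a ready queue drives releases
-- outside the precondition, e.g. on detect_deadlock([1], [[-5], [0]], [[1], [0]]): A returns [1], B returns []; on detect_deadlock([1], [[]], [[2]]): A returns [0], B returns [0]
import Mathlib
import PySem

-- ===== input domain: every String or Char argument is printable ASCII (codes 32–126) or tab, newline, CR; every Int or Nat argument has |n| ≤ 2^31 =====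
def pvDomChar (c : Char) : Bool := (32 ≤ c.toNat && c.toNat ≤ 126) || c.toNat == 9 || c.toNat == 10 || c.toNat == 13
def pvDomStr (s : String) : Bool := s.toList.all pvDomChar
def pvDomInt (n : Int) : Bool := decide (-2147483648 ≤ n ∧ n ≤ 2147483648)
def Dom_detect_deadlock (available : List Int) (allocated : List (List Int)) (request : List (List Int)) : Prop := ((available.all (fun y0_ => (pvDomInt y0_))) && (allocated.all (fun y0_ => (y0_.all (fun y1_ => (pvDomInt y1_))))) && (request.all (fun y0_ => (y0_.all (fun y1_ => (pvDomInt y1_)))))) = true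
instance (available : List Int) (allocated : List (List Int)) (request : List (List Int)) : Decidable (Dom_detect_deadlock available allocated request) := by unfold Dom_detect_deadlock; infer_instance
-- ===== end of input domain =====

-- B is event-driven: per-process unsatisfied-resource counters plus a per-resource
-- reverse index of blocked processes, rechecking only waiters of a resource that grew,
-- instead of A's repeated full sweeps; same return value on Pre_.

-- ===== PORT A =====
-- one process step of A's inner `for i in range(num_processes)` scan; state = (work, finish, progress)
def pvStepA (request allocated : List (List Int)) (R : Nat) (s : List Int × List Bool × Bool) (i : Nat) : List Int × List Bool × Bool :=
  if s.2.1.getD i false = false then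
    if (List.range R).all (fun j => decide ((request.getD i []).getD j 0 ≤ s.1.getD j 0)) then
      ((List.range R).map (fun j => s.1.getD j 0 + (allocated.getD i []).getD j 0), s.2.1.set i true, true)
    else s
  else s

-- A's `while True` loop; each productive pass finishes ≥ 1 process, so fuel P+1 is enough
def pvLoopA (request allocated : List (List Int)) (R P : Nat) : Nat → List Int → List Bool → List Bool
  | 0, _, f => f
  | fuel+1, w, f =>
    let s := (List.range P).foldl (pvStepA request allocated R) (w, f, false)
    if s.2.2 then pvLoopA request allocated R P fuel s.1 s.2.1 else s.2.1

def detect_deadlock (available : List Int) (allocated : List (List Int)) (request : List (List Int)) : List Int :=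
  let P := allocated.length
  let R := available.length
  let f := pvLoopA request allocated R P (P + 1) available (List.replicate P false)
  (List.range P).foldl (fun acc i => if f.getD i false = false then acc ++ [(i : Int)] else acc) []

-- ===== PORT B =====
-- init: `for i in range(P): for j in range(R): if request[i][j] > work[j]: deficit[i] += 1; waiters[j].append(i)`
def pvInitStep (request : List (List Int)) (w : List Int) (i : Nat) (t : List Int × List (List Nat)) (j : Nat) : List Int × List (List Nat) :=
  if w.getD j 0 < (request.getD i []).getD j 0 then
    (t.1.set i (t.1.getD i 0 + 1), t.2.set j (t.2.getD j [] ++ [i]))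
  else t

def pvInitInner (request : List (List Int)) (w : List Int) (R i : Nat) (s : List Int × List (List Nat)) : List Int × List (List Nat) :=
  (List.range R).foldl (pvInitStep request w i) s

def pvInitB (request : List (List Int)) (w : List Int) (P R : Nat) : List Int × List (List Nat) :=
  (List.range P).foldl (fun s i => pvInitInner request w R i s) (List.replicate P (0 : Int), List.replicate R ([] : List Nat))

-- inner `for k in waiters[j]` scan; state = (deficit, ready, still)
def pvScanB (request : List (List Int)) (j : Nat) (wj : Int)
    (t : List Int × List Nat × List Nat) (k : Nat) : List Int × List Nat × List Nat :=
  if (request.getD k []).getD j 0 ≤ wj then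
    let d := t.1.set k (t.1.getD k 0 - 1)
    if d.getD k 0 = 0 then (d, t.2.1 ++ [k], t.2.2) else (d, t.2.1, t.2.2)
  else (t.1, t.2.1, t.2.2 ++ [k])

-- per-resource step of `for j in range(R)`; state S = (work, deficit, waiters, ready)
def pvRelB (request allocated : List (List Int)) (i : Nat)
    (S : List Int × List Int × List (List Nat) × List Nat) (j : Nat) :
    List Int × List Int × List (List Nat) × List Nat :=
  let a := (allocated.getD i []).getD j 0
  if a ≠ 0 then
    let wj := S.1.getD j 0 + a
    let t := (S.2.2.1.getD j []).foldl (pvScanB request j wj) (S.2.1, S.2.2.2, [])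
    (S.1.set j wj, t.1, S.2.2.1.set j t.2.2, t.2.1)
  else S

-- `while ready:` — each pop finishes a distinct process, so fuel P is enough
def pvLoopN (request allocated : List (List Int)) (R : Nat) :
    Nat → List Int → List Int → List (List Nat) → List Nat → List Int
  | 0, _, d, _, _ => d
  | fuel+1, w, d, ws, rd =>
    match rd.getLast? with
    | none => d
    | some i =>
      let S := (List.range R).foldl (pvRelB request allocated i) (w, d, ws, rd.dropLast)
      pvLoopN request allocated R fuel S.1 S.2.1 S.2.2.1 S.2.2.2

def detect_deadlock_alt (available : List Int) (allocated : List (List Int)) (request : List (List Int)) : List Int :=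
  let P := allocated.length
  let R := available.length
  let dw := pvInitB request available P R
  let ready := (List.range P).filter (fun i => decide (dw.1.getD i 0 = 0))
  let d := pvLoopN request allocated R P available dw.1 dw.2 ready
  ((List.range P).filter (fun i => decide (d.getD i 0 ≠ 0))).map (fun i => (i : Int))

-- ===== PRECONDITION & SPEC =====
-- Pre_ excludes (a) ragged inputs on which Python A raises IndexError (fewer request
-- rows than processes, or a used row shorter than `available`) — slightly narrower than
-- A's exact raising set because a too-short row of a process whose scan breaks early is
-- never fully indexed — and (b) the unnatural inputs with a negative allocation entry,
-- where releasing "resources" shrinks work and A's sweep order makes the answer an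
-- accident of elimination order; see claim.json cites.
def Pre_detect_deadlock (available : List Int) (allocated : List (List Int)) (request : List (List Int)) : Prop :=
  allocated.length ≤ request.length ∧
  (∀ row ∈ allocated, available.length ≤ row.length ∧ ∀ x ∈ row, 0 ≤ x) ∧
  (∀ row ∈ request.take allocated.length, available.length ≤ row.length)
instance (available : List Int) (allocated : List (List Int)) (request : List (List Int)) : Decidable (Pre_detect_deadlock available allocated request) := by unfold Pre_detect_deadlock; infer_instance

def pvWitness_detect_deadlock : List Int × List (List Int) × List (List Int) :=
  ([1, 0], [[0, 1], [1, 0], [0, 0]], [[1, 0], [0, 2], [0, 0]])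

def Spec_detect_deadlock (available : List Int) (allocated : List (List Int)) (request : List (List Int)) (out : List Int) : Prop := out = detect_deadlock_alt available allocated request
instance (available : List Int) (allocated : List (List Int)) (request : List (List Int)) (out : List Int) : Decidable (Spec_detect_deadlock available allocated request out) := by unfold Spec_detect_deadlock; infer_instance

-- ===== CLAIM (what is proved, stated in full; the proofs are below) =====
def Claim_equal_detect_deadlock : Prop := ∀ (available : List Int) (allocated : List (List Int)) (request : List (List Int)), Dom_detect_deadlock available allocated request → Pre_detect_deadlock available allocated request → Spec_detect_deadlock available allocated request (detect_deadlock available allocated request)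

-- ===== LEMMAS AND PROOFS =====

-- ---- shared proof-level vocabulary ----
def pvElig (request : List (List Int)) (R : Nat) (w : List Int) (i : Nat) : Bool :=
  (List.range R).all (fun j => decide ((request.getD i []).getD j 0 ≤ w.getD j 0))

def pvRel (allocated : List (List Int)) (R : Nat) (w : List Int) (i : Nat) : List Int :=
  (List.range R).map (fun j => w.getD j 0 + (allocated.getD i []).getD j 0)

def pvNN (allocated : List (List Int)) : Prop := ∀ i j : Nat, 0 ≤ (allocated.getD i []).getD j 0

def pvCnt (request : List (List Int)) (R : Nat) (w : List Int) (i : Nat) : Nat :=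
  (List.range R).countP (fun j => decide (w.getD j 0 < (request.getD i []).getD j 0))

-- canonical one-at-a-time elimination: remove the first satisfiable pending process, repeat
def pvSurv (request allocated : List (List Int)) (R : Nat) (w : List Int) (pending : List Nat) : List Nat :=
  match h : pending.find? (fun i => pvElig request R w i) with
  | none => pending
  | some i => pvSurv request allocated R (pvRel allocated R w i) (pending.erase i)
termination_by pending.length
decreasing_by
  have hm : i ∈ pending := List.mem_of_find?_eq_some h
  have h1 : (pending.erase i).length = pending.length - 1 := List.length_erase_of_mem hm
  have h2 : 0 < pending.length := List.length_pos_of_mem hm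
  omega

lemma pvSurv_stuck (request allocated : List (List Int)) (R : Nat) (w : List Int) (pending : List Nat)
    (h : ∀ i ∈ pending, pvElig request R w i = false) :
    pvSurv request allocated R w pending = pending := by
  rw [pvSurv]
  split
  · rfl
  · next i hfind =>
    have hm := List.mem_of_find?_eq_some hfind
    have he := List.find?_some hfind
    simp only at he
    rw [h i hm] at he
    cases he

lemma pvRel_getD (allocated : List (List Int)) (R : Nat) (w : List Int) (i j : Nat) (hj : j < R) :
    (pvRel allocated R w i).getD j 0 = w.getD j 0 + (allocated.getD i []).getD j 0 := by
  unfold pvRel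
  rw [List.getD, List.getElem?_map]
  simp [List.getElem?_range, hj]

lemma pvElig_mono (request allocated : List (List Int)) (R : Nat) (w w' : List Int) (k : Nat)
    (hw : ∀ j < R, w.getD j 0 ≤ w'.getD j 0) (h : pvElig request R w k = true) :
    pvElig request R w' k = true := by
  unfold pvElig at h ⊢
  simp only [List.all_eq_true, List.mem_range, decide_eq_true_eq] at h ⊢
  intro j hj
  exact le_trans (h j hj) (hw j hj)

lemma pvRel_mono (allocated : List (List Int)) (R : Nat) (w : List Int) (i : Nat)
    (hA : pvNN allocated) : ∀ j < R, w.getD j 0 ≤ (pvRel allocated R w i).getD j 0 := by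
  intro j hj
  rw [pvRel_getD allocated R w i j hj]
  have := hA i j
  omega

lemma pvRel_comm (allocated : List (List Int)) (R : Nat) (w : List Int) (i k : Nat) :
    pvRel allocated R (pvRel allocated R w i) k = pvRel allocated R (pvRel allocated R w k) i := by
  unfold pvRel
  refine List.map_congr_left ?_
  intro j hj
  rw [List.mem_range] at hj
  have h1 := pvRel_getD allocated R w i j hj
  have h2 := pvRel_getD allocated R w k j hj
  unfold pvRel at h1 h2
  rw [h1, h2]; ring

-- exchange: eliminating any satisfiable pending process first does not change the survivors
lemma pvSurv_step (request allocated : List (List Int)) (R : Nat) (hA : pvNN allocated) :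
    ∀ (n : Nat) (pending : List Nat) (w : List Int) (i : Nat), pending.length ≤ n →
      pending.Nodup → i ∈ pending → pvElig request R w i = true →
      pvSurv request allocated R w pending = pvSurv request allocated R (pvRel allocated R w i) (pending.erase i) := by
  intro n
  induction n with
  | zero =>
    intro pending w i hlen hnd hm he
    have := List.length_pos_of_mem hm; omega
  | succ n ih =>
    intro pending w i hlen hnd hm helig
    rw [pvSurv]
    split
    · next hnone =>
      rw [List.find?_eq_none] at hnone
      have := hnone i hm
      simp [helig] at this
    · next i0 hfind =>
      have hm0 := List.mem_of_find?_eq_some hfind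
      have he0 : pvElig request R w i0 = true := by
        have := List.find?_some hfind; simpa using this
      by_cases hii : i0 = i
      · subst hii; rfl
      · have hpos := List.length_pos_of_mem hm0
        have hlen0 : (pending.erase i0).length ≤ n := by
          rw [List.length_erase_of_mem hm0]; omega
        have hmi : i ∈ pending.erase i0 :=
          (List.mem_erase_of_ne (fun h => hii h.symm)).mpr hm
        have hei : pvElig request R (pvRel allocated R w i0) i = true :=
          pvElig_mono request allocated R w _ i (pvRel_mono allocated R w i0 hA) helig
        have L := ih (pending.erase i0) (pvRel allocated R w i0) i hlen0 (hnd.erase _) hmi hei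
        have hlenr : (pending.erase i).length ≤ n := by
          rw [List.length_erase_of_mem hm]; omega
        have hmr : i0 ∈ pending.erase i := (List.mem_erase_of_ne hii).mpr hm0
        have her : pvElig request R (pvRel allocated R w i) i0 = true :=
          pvElig_mono request allocated R w _ i0 (pvRel_mono allocated R w i hA) he0
        have Rr := ih (pending.erase i) (pvRel allocated R w i) i0 hlenr (hnd.erase _) hmr her
        rw [L, Rr, pvRel_comm, List.erase_comm]

-- permutation invariance of the survivor set
lemma pvSurv_perm (request allocated : List (List Int)) (R : Nat) (hA : pvNN allocated) :
    ∀ (n : Nat) (p p' : List Nat) (w : List Int), p.length ≤ n → p.Perm p' → p.Nodup →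
      (pvSurv request allocated R w p).Perm (pvSurv request allocated R w p') := by
  intro n
  induction n with
  | zero =>
    intro p p' w hlen hperm hnd
    have hp : p = [] := by cases p with | nil => rfl | cons a t => simp at hlen
    subst hp
    have hp' : p' = [] := hperm.symm.eq_nil
    subst hp'
    exact List.Perm.refl _
  | succ n ih =>
    intro p p' w hlen hperm hnd
    have hnd' : p'.Nodup := hperm.nodup_iff.mp hnd
    by_cases hex : ∃ i ∈ p, pvElig request R w i = true
    · obtain ⟨i, hm, he⟩ := hex
      have hm' : i ∈ p' := hperm.subset hm
      have hlen' : p'.length ≤ n + 1 := by rw [← hperm.length_eq]; exact hlen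
      rw [pvSurv_step request allocated R hA (n+1) p w i hlen hnd hm he,
          pvSurv_step request allocated R hA (n+1) p' w i hlen' hnd' hm' he]
      have hpos := List.length_pos_of_mem hm
      refine ih _ _ _ ?_ (hperm.erase i) (hnd.erase _)
      rw [List.length_erase_of_mem hm]; omega
    · push Not at hex
      have h1 : ∀ i ∈ p, pvElig request R w i = false := by
        intro i hi
        have := hex i hi
        cases h : pvElig request R w i
        · rfl
        · exact absurd h this
      rw [pvSurv_stuck request allocated R w p h1,
          pvSurv_stuck request allocated R w p' (fun i hi => h1 i (hperm.mem_iff.mpr hi))]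
      exact hperm

lemma pvSurv_sublist (request allocated : List (List Int)) (R : Nat) :
    ∀ (n : Nat) (pending : List Nat) (w : List Int), pending.length ≤ n →
      (pvSurv request allocated R w pending).Sublist pending := by
  intro n
  induction n with
  | zero =>
    intro pending w hlen
    have hp : pending = [] := by cases pending with | nil => rfl | cons a t => simp at hlen
    subst hp
    rw [pvSurv_stuck request allocated R w [] (by intro x hx; cases hx)]
  | succ n ih =>
    intro pending w hlen
    rw [pvSurv]
    split
    · exact List.Sublist.refl _
    · next i0 hfind =>
      have hm0 := List.mem_of_find?_eq_some hfind
      have hpos := List.length_pos_of_mem hm0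
      refine (ih _ _ ?_).trans (List.erase_sublist ..)
      rw [List.length_erase_of_mem hm0]; omega

-- ---- A-side: the sweep loop re-expressed over a worklist of unfinished indices ----
-- one process step of a sweep restricted to still-unfinished indices; state = (work, still)
def pvStepS (request allocated : List (List Int)) (R : Nat) (s : List Int × List Nat) (i : Nat) : List Int × List Nat :=
  if (List.range R).all (fun j => decide ((request.getD i []).getD j 0 ≤ s.1.getD j 0)) then
    ((List.range R).map (fun j => s.1.getD j 0 + (allocated.getD i []).getD j 0), s.2)
  else (s.1, s.2 ++ [i])

def pvLoopS (request allocated : List (List Int)) (R : Nat) : Nat → List Int → List Nat → List Nat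
  | 0, _, pending => pending
  | fuel+1, w, pending =>
    let s := pending.foldl (pvStepS request allocated R) (w, [])
    if s.2.length = pending.length then pending else pvLoopS request allocated R fuel s.1 s.2

-- indices other than the processed one keep their finish flag
lemma pvStepA_getD_ne (request allocated : List (List Int)) (R : Nat)
    (s : List Int × List Bool × Bool) (i i' : Nat) (h : i ≠ i') :
    (pvStepA request allocated R s i).2.1.getD i' false = s.2.1.getD i' false := by
  unfold pvStepA
  split_ifs <;> simp [List.getD, List.getElem?_set_ne h]

-- skipping: A's pass over a list of indices equals the pass over its unfinished sublist
lemma pvFoldA_skip (request allocated : List (List Int)) (R : Nat) :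
    ∀ (l : List Nat) (w : List Int) (f : List Bool) (p : Bool), l.Nodup →
      l.foldl (pvStepA request allocated R) (w, f, p)
        = (l.filter (fun i => f.getD i false = false)).foldl (pvStepA request allocated R) (w, f, p) := by
  intro l
  induction l with
  | nil => intro w f p _; rfl
  | cons i t ih =>
    intro w f p hnd
    have hnd' : t.Nodup := hnd.of_cons
    have hit : i ∉ t := (List.nodup_cons.mp hnd).1
    by_cases hfi : f.getD i false = false
    · have hd : decide (f.getD i false = false) = true := decide_eq_true hfi
      simp only [List.filter_cons, hd, if_true, List.foldl_cons]
      have key := ih (pvStepA request allocated R (w, f, p) i).1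
        (pvStepA request allocated R (w, f, p) i).2.1
        (pvStepA request allocated R (w, f, p) i).2.2 hnd'
      have hcong : t.filter (fun i' => decide ((pvStepA request allocated R (w, f, p) i).2.1.getD i' false = false))
          = t.filter (fun i' => decide (f.getD i' false = false)) := by
        refine List.filter_congr ?_
        intro x hx
        have hne : i ≠ x := fun h => hit (h ▸ hx)
        rw [pvStepA_getD_ne request allocated R (w, f, p) i x hne]
      rw [hcong] at key
      exact key
    · have hd : decide (f.getD i false = false) = false := decide_eq_false hfi
      have hstep : pvStepA request allocated R (w, f, p) i = (w, f, p) := by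
        unfold pvStepA; rw [if_neg hfi]
      simp only [List.filter_cons, hd, Bool.false_eq_true, if_false, List.foldl_cons, hstep]
      exact ih w f p hnd'

-- pass correspondence: A's scan over an all-unfinished index list l vs the worklist scan over l
lemma pvPass_corr (request allocated : List (List Int)) (R : Nat) :
    ∀ (l : List Nat) (w : List Int) (f : List Bool) (p : Bool) (still : List Nat),
      l.Nodup → (∀ i ∈ l, i < f.length ∧ f.getD i false = false) →
      (l.foldl (pvStepA request allocated R) (w, f, p)).1
          = (l.foldl (pvStepS request allocated R) (w, still)).1 ∧
      (l.foldl (pvStepS request allocated R) (w, still)).2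
          = still ++ l.filter (fun i => (l.foldl (pvStepA request allocated R) (w, f, p)).2.1.getD i false = false) ∧
      (∀ i, i ∉ l → (l.foldl (pvStepA request allocated R) (w, f, p)).2.1.getD i false = f.getD i false) ∧
      (l.foldl (pvStepA request allocated R) (w, f, p)).2.1.length = f.length ∧
      (l.foldl (pvStepA request allocated R) (w, f, p)).2.2
          = (p || decide (∃ i ∈ l, (l.foldl (pvStepA request allocated R) (w, f, p)).2.1.getD i false = true)) := by
  intro l
  induction l with
  | nil =>
    intro w f p still _ _
    simp
  | cons i t ih =>
    intro w f p still hnd hun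
    have hit : i ∉ t := (List.nodup_cons.mp hnd).1
    obtain ⟨hilen, hif⟩ := hun i (List.mem_cons_self ..)
    simp only [List.foldl_cons]
    by_cases hsat : ((List.range R).all (fun j => decide ((request.getD i []).getD j 0 ≤ w.getD j 0))) = true
    · -- process i finishes
      have hA : pvStepA request allocated R (w, f, p) i
          = ((List.range R).map (fun j => w.getD j 0 + (allocated.getD i []).getD j 0), f.set i true, true) := by
        unfold pvStepA; rw [if_pos hif, if_pos hsat]
      have hB : pvStepS request allocated R (w, still) i
          = ((List.range R).map (fun j => w.getD j 0 + (allocated.getD i []).getD j 0), still) := by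
        unfold pvStepS; rw [if_pos hsat]
      simp only [hA, hB]
      have hun' : ∀ i' ∈ t, i' < (f.set i true).length ∧ (f.set i true).getD i' false = false := by
        intro i' hi'
        obtain ⟨h1, h2⟩ := hun i' (List.mem_cons_of_mem _ hi')
        refine ⟨by simpa using h1, ?_⟩
        have hne : i ≠ i' := fun h => hit (h ▸ hi')
        simpa [List.getD, List.getElem?_set_ne hne] using h2
      obtain ⟨c1, c2, c3, c4, c5⟩ := ih ((List.range R).map (fun j => w.getD j 0 + (allocated.getD i []).getD j 0))
        (f.set i true) true still hnd.of_cons hun'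
      have hAi : (t.foldl (pvStepA request allocated R)
          ((List.range R).map (fun j => w.getD j 0 + (allocated.getD i []).getD j 0), f.set i true, true)).2.1.getD i false = true := by
        rw [c3 i hit]
        simp [List.getD, List.getElem?_set_self hilen]
      refine ⟨c1, ?_, ?_, by simpa using c4, ?_⟩
      · rw [c2]
        have hd : decide ((t.foldl (pvStepA request allocated R)
            ((List.range R).map (fun j => w.getD j 0 + (allocated.getD i []).getD j 0), f.set i true, true)).2.1.getD i false = false) = false := by
          rw [hAi]; simp
        simp only [List.filter_cons, hd, Bool.false_eq_true, if_false]
      · intro i' hi'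
        have h1 : i' ∉ t := fun h => hi' (List.mem_cons_of_mem _ h)
        have h2 : i' ≠ i := fun h => hi' (h ▸ List.mem_cons_self ..)
        rw [c3 i' h1]
        simp [List.getD, List.getElem?_set_ne (Ne.symm h2)]
      · rw [c5]
        simp only [Bool.true_or]
        symm
        rw [decide_eq_true ⟨i, List.mem_cons_self .., hAi⟩, Bool.or_true]
    · -- process i stays blocked
      have hA : pvStepA request allocated R (w, f, p) i = (w, f, p) := by
        unfold pvStepA; rw [if_pos hif, if_neg hsat]
      have hB : pvStepS request allocated R (w, still) i = (w, still ++ [i]) := by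
        unfold pvStepS; rw [if_neg hsat]
      simp only [hA, hB]
      have hun' : ∀ i' ∈ t, i' < f.length ∧ f.getD i' false = false :=
        fun i' hi' => hun i' (List.mem_cons_of_mem _ hi')
      obtain ⟨c1, c2, c3, c4, c5⟩ := ih w f p (still ++ [i]) hnd.of_cons hun'
      have hAi : (t.foldl (pvStepA request allocated R) (w, f, p)).2.1.getD i false = false := by
        rw [c3 i hit]; exact hif
      refine ⟨c1, ?_, ?_, c4, ?_⟩
      · rw [c2]
        have hd : decide ((t.foldl (pvStepA request allocated R) (w, f, p)).2.1.getD i false = false) = true := by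
          rw [hAi]; simp
        simp only [List.filter_cons, hd, if_true, List.append_assoc, List.singleton_append]
      · intro i' hi'
        exact c3 i' (fun h => hi' (List.mem_cons_of_mem _ h))
      · rw [c5]
        congr 1
        simp only [decide_eq_decide, List.mem_cons]
        constructor
        · rintro ⟨x, hx, h⟩; exact ⟨x, Or.inr hx, h⟩
        · rintro ⟨x, hx | hx, h⟩
          · rw [hx] at h; rw [hAi] at h; cases h
          · exact ⟨x, hx, h⟩

-- loop correspondence: with pending = the unfinished indices of range P, A's loop equals the worklist loop
lemma pvLoop_corr (request allocated : List (List Int)) (R P : Nat) :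
    ∀ (fuel : Nat) (w : List Int) (f : List Bool) (pending : List Nat),
      f.length = P → pending = (List.range P).filter (fun i => f.getD i false = false) →
      pvLoopS request allocated R fuel w pending
        = (List.range P).filter (fun i => (pvLoopA request allocated R P fuel w f).getD i false = false) := by
  intro fuel
  induction fuel with
  | zero => intro w f pending _ hp; exact hp
  | succ fuel ih =>
    intro w f pending hfP hp
    have hndP : (List.range P).Nodup := List.nodup_range
    have hnd : pending.Nodup := by rw [hp]; exact hndP.filter _
    have hun : ∀ i ∈ pending, i < f.length ∧ f.getD i false = false := by
      intro i hi
      rw [hp] at hi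
      simp only [List.mem_filter, List.mem_range, decide_eq_true_eq] at hi
      exact ⟨hfP ▸ hi.1, hi.2⟩
    have hskip : (List.range P).foldl (pvStepA request allocated R) (w, f, false)
        = pending.foldl (pvStepA request allocated R) (w, f, false) := by
      rw [pvFoldA_skip request allocated R (List.range P) w f false hndP, hp]
    obtain ⟨c1, c2, c3, c4, c5⟩ :=
      pvPass_corr request allocated R pending w f false [] hnd hun
    set FA := pending.foldl (pvStepA request allocated R) (w, f, false) with hFA
    set FB := pending.foldl (pvStepS request allocated R) (w, ([] : List Nat)) with hFB
    rw [List.nil_append] at c2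
    -- the final-flag filter over range P equals the worklist still-list
    have hfilt : (List.range P).filter (fun i => FA.2.1.getD i false = false) = FB.2 := by
      rw [c2]
      conv_rhs => rw [hp]
      rw [List.filter_filter]
      refine List.filter_congr ?_
      intro i _
      by_cases h : FA.2.1.getD i false = false
      · have hf : f.getD i false = false := by
          by_contra hfi
          have hnp : i ∉ pending := by
            rw [hp]
            simp only [List.mem_filter, decide_eq_true_eq]
            tauto
          rw [c3 i hnp] at h
          exact hfi h
        have h' : FA.2.1[i]?.getD false = false := h
        have hf' : f[i]?.getD false = false := hf
        simp [h', hf']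
      · have h' : ¬ FA.2.1[i]?.getD false = false := h
        simp [h']
    by_cases hprog : FA.2.2 = true
    · -- progress: both loops recurse in lockstep
      have hneq : ¬ FB.2.length = pending.length := by
        intro hlen
        have hsub : FB.2.Sublist pending := by
          rw [c2]; exact List.filter_sublist
        have heq := hsub.eq_of_length hlen
        rw [c5] at hprog
        simp only [Bool.false_or, decide_eq_true_eq] at hprog
        obtain ⟨i, hi, htrue⟩ := hprog
        have hmem : i ∈ FB.2 := by rw [heq]; exact hi
        rw [c2] at hmem
        simp only [List.mem_filter, decide_eq_true_eq] at hmem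
        rw [hmem.2] at htrue
        cases htrue
      show pvLoopS request allocated R (fuel+1) w pending = _
      simp only [pvLoopS, pvLoopA, hskip, ← hFB]
      rw [if_pos hprog, if_neg hneq, ← c1]
      exact ih FA.1 FA.2.1 FB.2 (c4.trans hfP) hfilt.symm
    · -- no progress: both loops stop with the same unfinished set
      have hnoone : ∀ i ∈ pending, FA.2.1.getD i false = false := by
        rw [c5] at hprog
        simp only [Bool.false_or, decide_eq_true_eq] at hprog
        intro i hi
        cases h : FA.2.1.getD i false
        · rfl
        · exact absurd ⟨i, hi, h⟩ hprog
      have hBeq : FB.2 = pending := by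
        rw [c2]
        refine List.filter_eq_self.mpr ?_
        intro i hi
        rw [hnoone i hi]
        simp
      have hlen : FB.2.length = pending.length := by rw [hBeq]
      show pvLoopS request allocated R (fuel+1) w pending = _
      simp only [pvLoopS, pvLoopA, hskip, ← hFB]
      rw [if_neg hprog, if_pos hlen]
      rw [hfilt, hBeq]

-- A's port equals the worklist sweep loop (unconditionally)
lemma pvA_eq_sweep (available : List Int) (allocated : List (List Int)) (request : List (List Int)) :
    detect_deadlock available allocated request
      = (pvLoopS request allocated available.length (allocated.length + 1) available
          (List.range allocated.length)).map (fun i => (i : Int)) := by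
  have hrep : ∀ i, (List.replicate allocated.length false).getD i false = false := by
    intro i
    simp only [List.getD, List.getElem?_replicate]
    split <;> rfl
  have hinit : List.range allocated.length
      = (List.range allocated.length).filter
          (fun i => (List.replicate allocated.length false).getD i false = false) := by
    symm
    refine List.filter_eq_self.mpr ?_
    intro i _
    rw [hrep i]
    simp
  dsimp only [detect_deadlock]
  rw [PySem.List.foldl_append_ite
    (fun i => (pvLoopA request allocated available.length allocated.length (allocated.length + 1)
      available (List.replicate allocated.length false)).getD i false = false) (fun i => (i : Int))]
  rw [← pvLoop_corr request allocated available.length allocated.length (allocated.length + 1)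
        available (List.replicate allocated.length false) (List.range allocated.length)
        (by simp) hinit]
  rw [List.nil_append]
  generalize (pvLoopS request allocated available.length (allocated.length + 1) available
    (List.range allocated.length)) = l
  induction l with
  | nil => rfl
  | cons a l ihl => simp_all [List.flatMap]

-- ---- sweep = canonical elimination (under nonnegative allocations) ----
-- one sweep pass preserves the survivor computation
lemma pvPass_surv (request allocated : List (List Int)) (R : Nat) (hA : pvNN allocated) :
    ∀ (rest : List Nat) (w : List Int) (still : List Nat), (still ++ rest).Nodup →
      pvSurv request allocated R w (still ++ rest)
          = pvSurv request allocated R (rest.foldl (pvStepS request allocated R) (w, still)).1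
              (rest.foldl (pvStepS request allocated R) (w, still)).2 ∧
      (rest.foldl (pvStepS request allocated R) (w, still)).2.Sublist (still ++ rest) ∧
      ((rest.foldl (pvStepS request allocated R) (w, still)).2.length = (still ++ rest).length →
        (rest.foldl (pvStepS request allocated R) (w, still)).1 = w ∧
        ∀ i ∈ rest, pvElig request R w i = false) := by
  intro rest
  induction rest with
  | nil =>
    intro w still hnd
    refine ⟨by simp, by simp, fun _ => ⟨rfl, fun i hi => absurd hi (List.not_mem_nil)⟩⟩
  | cons i rest ih =>
    intro w still hnd
    have hsub0 : (still ++ rest).Sublist (still ++ i :: rest) :=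
      (List.sublist_cons_self i rest).append_left still
    have hnd0 : (still ++ rest).Nodup := hnd.sublist hsub0
    simp only [List.foldl_cons]
    by_cases hsat : pvElig request R w i = true
    · have hsat' := hsat
      unfold pvElig at hsat'
      have hstep : pvStepS request allocated R (w, still) i = (pvRel allocated R w i, still) := by
        unfold pvStepS
        rw [if_pos hsat']
        rfl
      rw [hstep]
      obtain ⟨c1, c2, c3⟩ := ih (pvRel allocated R w i) still hnd0
      have hmem : i ∈ still ++ i :: rest := by simp
      have hnotstill : i ∉ still := by
        intro hin
        have := List.disjoint_of_nodup_append hnd hin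
        simp at this
      have herase : (still ++ i :: rest).erase i = still ++ rest := by
        rw [List.erase_append_right _ hnotstill, List.erase_cons_head]
      refine ⟨?_, c2.trans hsub0, ?_⟩
      · rw [pvSurv_step request allocated R hA (still ++ i :: rest).length _ w i le_rfl hnd hmem hsat,
            herase]
        exact c1
      · intro hlen
        exfalso
        have h1 := c2.length_le
        simp only [List.length_append, List.length_cons] at hlen h1
        omega
    · have hstep : pvStepS request allocated R (w, still) i = (w, still ++ [i]) := by
        unfold pvStepS
        rw [if_neg (by unfold pvElig at hsat; exact hsat)]
      rw [hstep]
      have hre : still ++ i :: rest = (still ++ [i]) ++ rest := by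
        rw [List.append_cons]
      have hnd1 : ((still ++ [i]) ++ rest).Nodup := by rw [← hre]; exact hnd
      obtain ⟨c1, c2, c3⟩ := ih w (still ++ [i]) hnd1
      refine ⟨by rw [hre]; exact c1, by rw [hre]; exact c2, ?_⟩
      intro hlen
      have hlen' : (rest.foldl (pvStepS request allocated R) (w, still ++ [i])).2.length
          = ((still ++ [i]) ++ rest).length := by rw [← hre]; exact hlen
      obtain ⟨hw, hall⟩ := c3 hlen'
      refine ⟨hw, fun x hx => ?_⟩
      rcases List.mem_cons.mp hx with hx | hx
      · subst hx
        cases h : pvElig request R w x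
        · rfl
        · exact absurd h hsat
      · exact hall x hx

lemma pvSweep_surv (request allocated : List (List Int)) (R : Nat) (hA : pvNN allocated) :
    ∀ (fuel : Nat) (w : List Int) (pending : List Nat), pending.Nodup → pending.length < fuel →
      pvLoopS request allocated R fuel w pending = pvSurv request allocated R w pending := by
  intro fuel
  induction fuel with
  | zero => intro w pending _ hlen; omega
  | succ fuel ih =>
    intro w pending hnd hlen
    obtain ⟨c1, c2, c3⟩ := pvPass_surv request allocated R hA pending w [] (by simpa using hnd)
    simp only [List.nil_append] at c1 c2 c3
    show pvLoopS request allocated R (fuel+1) w pending = _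
    simp only [pvLoopS]
    split
    · next hl =>
      obtain ⟨hw, hall⟩ := c3 hl
      rw [pvSurv_stuck request allocated R w pending hall]
    · next hl =>
      have hlt : (pending.foldl (pvStepS request allocated R) (w, [])).2.length < pending.length := by
        have := c2.length_le
        omega
      rw [ih _ _ (hnd.sublist c2) (by omega), ← c1]

-- ---- B-side: arithmetic of counters under a work increase ----
lemma pvPerm_of_mem_iff {l1 l2 : List Nat} (h1 : l1.Nodup) (h2 : l2.Nodup)
    (h : ∀ x, x ∈ l1 ↔ x ∈ l2) : l1.Perm l2 :=
  (List.perm_ext_iff_of_nodup h1 h2).mpr h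

lemma pvCnt_zero_iff (request : List (List Int)) (R : Nat) (w : List Int) (i : Nat) :
    pvCnt request R w i = 0 ↔ pvElig request R w i = true := by
  unfold pvCnt pvElig
  rw [List.countP_eq_zero]
  simp [List.all_eq_true, not_lt]

lemma pvGetD_set_self (w : List Int) (j : Nat) (v : Int) (h : j < w.length) :
    (w.set j v).getD j 0 = v := by
  simp [List.getD, List.getElem?_set_self h]

lemma pvGetD_set_ne (w : List Int) (j x : Nat) (v : Int) (h : j ≠ x) :
    (w.set j v).getD x 0 = w.getD x 0 := by
  simp [List.getD, List.getElem?_set_ne h]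

lemma pvCnt_set (request : List (List Int)) (R : Nat) (w : List Int) (j : Nat) (wj : Int)
    (hj : j < R) (hw : w.length = R) (hmono : w.getD j 0 ≤ wj) (i : Nat) :
    (pvCnt request R (w.set j wj) i : Int)
      = (pvCnt request R w i : Int)
        - (if w.getD j 0 < (request.getD i []).getD j 0 ∧ (request.getD i []).getD j 0 ≤ wj then 1 else 0) := by
  have hmem : j ∈ List.range R := List.mem_range.mpr hj
  have hperm := List.perm_cons_erase hmem
  have hje : j ∉ (List.range R).erase j := (List.nodup_range).not_mem_erase
  have e1 : ∀ (v : List Int), pvCnt request R v i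
      = ((List.range R).erase j).countP (fun j' => decide (v.getD j' 0 < (request.getD i []).getD j' 0))
        + (if v.getD j 0 < (request.getD i []).getD j 0 then 1 else 0) := by
    intro v
    unfold pvCnt
    rw [hperm.countP_eq, List.countP_cons]
    simp
  have e2 : ((List.range R).erase j).countP (fun j' => decide ((w.set j wj).getD j' 0 < (request.getD i []).getD j' 0))
      = ((List.range R).erase j).countP (fun j' => decide (w.getD j' 0 < (request.getD i []).getD j' 0)) := by
    refine List.countP_congr ?_
    intro x hx
    have hne : j ≠ x := fun h => hje (h ▸ hx)
    rw [pvGetD_set_ne w j x wj hne]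
  have hself : (w.set j wj).getD j 0 = wj := pvGetD_set_self w j wj (by omega)
  rw [e1, e1, e2, hself]
  split_ifs <;> push_cast <;> omega

-- ---- B-side: the inner `for k in waiters[j]` scan ----
lemma pvScan_corr (request : List (List Int)) (j : Nat) (wj : Int) :
    ∀ (wl : List Nat) (d : List Int) (rd acc : List Nat), wl.Nodup → (∀ k ∈ wl, k < d.length) →
      (wl.foldl (pvScanB request j wj) (d, rd, acc)).1.length = d.length ∧
      (∀ k, k ∉ wl → (wl.foldl (pvScanB request j wj) (d, rd, acc)).1.getD k 0 = d.getD k 0) ∧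
      (∀ k ∈ wl, (wl.foldl (pvScanB request j wj) (d, rd, acc)).1.getD k 0
          = d.getD k 0 - (if (request.getD k []).getD j 0 ≤ wj then 1 else 0)) ∧
      (wl.foldl (pvScanB request j wj) (d, rd, acc)).2.2
          = acc ++ wl.filter (fun k => decide (wj < (request.getD k []).getD j 0)) ∧
      (wl.foldl (pvScanB request j wj) (d, rd, acc)).2.1
          = rd ++ wl.filter (fun k => decide ((request.getD k []).getD j 0 ≤ wj ∧ d.getD k 0 = 1)) := by
  intro wl
  induction wl with
  | nil =>
    intro d rd acc _ _
    refine ⟨rfl, fun k _ => rfl, fun k hk => absurd hk (List.not_mem_nil), by simp, by simp⟩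
  | cons k0 t ih =>
    intro d rd acc hnd hlt
    have hk0t : k0 ∉ t := (List.nodup_cons.mp hnd).1
    have hk0d : k0 < d.length := hlt k0 (List.mem_cons_self ..)
    simp only [List.foldl_cons]
    by_cases hs : (request.getD k0 []).getD j 0 ≤ wj
    · have hd1 : (d.set k0 (d.getD k0 0 - 1)).getD k0 0 = d.getD k0 0 - 1 :=
        pvGetD_set_self d k0 _ hk0d
      have hstep : pvScanB request j wj (d, rd, acc) k0
          = (d.set k0 (d.getD k0 0 - 1),
             rd ++ (if d.getD k0 0 = 1 then [k0] else []), acc) := by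
        unfold pvScanB
        rw [if_pos hs]
        simp only [hd1]
        by_cases h1 : d.getD k0 0 = 1
        · rw [if_pos (by omega), if_pos h1]
        · rw [if_neg (by omega), if_neg h1]
          simp
      rw [hstep]
      have hlt' : ∀ k ∈ t, k < (d.set k0 (d.getD k0 0 - 1)).length := by
        intro k hk
        have := hlt k (List.mem_cons_of_mem _ hk)
        simpa using this
      obtain ⟨c1, c2, c3, c4, c5⟩ := ih (d.set k0 (d.getD k0 0 - 1))
        (rd ++ (if d.getD k0 0 = 1 then [k0] else [])) acc hnd.of_cons hlt'
      refine ⟨by simpa using c1, ?_, ?_, ?_, ?_⟩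
      · intro k hk
        have hne : k ≠ k0 := fun h => hk (h ▸ List.mem_cons_self ..)
        have hnt : k ∉ t := fun h => hk (List.mem_cons_of_mem _ h)
        rw [c2 k hnt, pvGetD_set_ne d k0 k _ (Ne.symm hne)]
      · intro k hk
        rcases List.mem_cons.mp hk with hk | hk
        · subst hk
          rw [c2 k hk0t, hd1, if_pos hs]
        · have hne : k0 ≠ k := fun h => hk0t (h ▸ hk)
          rw [c3 k hk, pvGetD_set_ne d k0 k _ hne]
      · rw [c4]
        have : decide (wj < (request.getD k0 []).getD j 0) = false :=
          decide_eq_false (not_lt.mpr hs)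
        simp only [List.filter_cons, this, Bool.false_eq_true, if_false]
      · rw [c5]
        have hcong : t.filter (fun k => decide ((request.getD k []).getD j 0 ≤ wj ∧ (d.set k0 (d.getD k0 0 - 1)).getD k 0 = 1))
            = t.filter (fun k => decide ((request.getD k []).getD j 0 ≤ wj ∧ d.getD k 0 = 1)) := by
          refine List.filter_congr ?_
          intro x hx
          have hne : k0 ≠ x := fun h => hk0t (h ▸ hx)
          rw [pvGetD_set_ne d k0 x _ hne]
        rw [hcong]
        by_cases h1 : d.getD k0 0 = 1
        · have hh : decide ((request.getD k0 []).getD j 0 ≤ wj ∧ d.getD k0 0 = 1) = true :=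
            decide_eq_true ⟨hs, h1⟩
          simp only [List.filter_cons, hh, if_true, if_pos h1, List.append_assoc, List.singleton_append]
        · have hh : decide ((request.getD k0 []).getD j 0 ≤ wj ∧ d.getD k0 0 = 1) = false :=
            decide_eq_false (fun hc => h1 hc.2)
          simp only [List.filter_cons, hh, Bool.false_eq_true, if_false, if_neg h1, List.append_nil]
    · have hstep : pvScanB request j wj (d, rd, acc) k0 = (d, rd, acc ++ [k0]) := by
        unfold pvScanB
        rw [if_neg hs]
      rw [hstep]
      obtain ⟨c1, c2, c3, c4, c5⟩ := ih d rd (acc ++ [k0]) hnd.of_cons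
        (fun k hk => (hlt k (List.mem_cons_of_mem _ hk)))
      refine ⟨c1, ?_, ?_, ?_, ?_⟩
      · intro k hk
        exact c2 k (fun h => hk (List.mem_cons_of_mem _ h))
      · intro k hk
        rcases List.mem_cons.mp hk with hk | hk
        · subst hk
          rw [c2 k hk0t, if_neg hs]
          omega
        · exact c3 k hk
      · rw [c4]
        have : decide (wj < (request.getD k0 []).getD j 0) = true :=
          decide_eq_true (lt_of_not_ge hs)
        simp only [List.filter_cons, this, if_true, List.append_assoc, List.singleton_append]
      · rw [c5]
        have : decide ((request.getD k0 []).getD j 0 ≤ wj ∧ d.getD k0 0 = 1) = false :=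
          decide_eq_false (fun hc => hs hc.1)
        simp only [List.filter_cons, this, Bool.false_eq_true, if_false]

-- ---- B-side: state invariant of the event-driven loop ----
lemma pvPre_NN (available : List Int) (allocated : List (List Int)) (request : List (List Int))
    (h : Pre_detect_deadlock available allocated request) : pvNN allocated := by
  intro i j
  rcases lt_or_ge i allocated.length with hi | hi
  · have hgd : allocated.getD i [] = allocated[i] := List.getD_eq_getElem allocated [] hi
    have hrow := (h.2.1 allocated[i] (List.getElem_mem hi)).2
    rcases lt_or_ge j allocated[i].length with hj | hj
    · rw [hgd, List.getD_eq_getElem allocated[i] 0 hj]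
      exact hrow _ (List.getElem_mem hj)
    · rw [hgd, List.getD_eq_default allocated[i] 0 hj]
  · rw [List.getD_eq_default allocated [] hi]
    simp [List.getD]

lemma pvGetD_set_self' {α : Type} (l : List α) (j : Nat) (v dflt : α) (h : j < l.length) :
    (l.set j v).getD j dflt = v := by
  simp [List.getD, List.getElem?_set_self h]

lemma pvGetD_set_ne' {α : Type} (l : List α) (j x : Nat) (v dflt : α) (h : j ≠ x) :
    (l.set j v).getD x dflt = l.getD x dflt := by
  simp [List.getD, List.getElem?_set_ne h]

-- invariant of state S = (work, deficit, waiters, ready)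
def pvInv (request : List (List Int)) (P R : Nat)
    (S : List Int × List Int × List (List Nat) × List Nat) : Prop :=
  S.1.length = R ∧ S.2.1.length = P ∧ S.2.2.1.length = R ∧
  (∀ i, i < P → S.2.1.getD i 0 = (pvCnt request R S.1 i : Int)) ∧
  (∀ j, j < R → S.2.2.1.getD j []
      = (List.range P).filter (fun k => decide (S.1.getD j 0 < (request.getD k []).getD j 0))) ∧
  S.2.2.2.Nodup ∧ (∀ i ∈ S.2.2.2, i < P ∧ S.2.1.getD i 0 = 0)

-- the not-yet-finished processes, blocked ones first
def pvPend (P : Nat) (d : List Int) (rd : List Nat) : List Nat :=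
  (List.range P).filter (fun i => decide (d.getD i 0 ≠ 0)) ++ rd

lemma pvPend_nodup (P : Nat) (d : List Int) (rd : List Nat)
    (hrd : rd.Nodup) (h0 : ∀ i ∈ rd, d.getD i 0 = 0) : (pvPend P d rd).Nodup := by
  unfold pvPend
  refine List.Nodup.append ((List.nodup_range).filter _) hrd ?_
  intro x hx hx2
  have h1 : d.getD x 0 ≠ 0 := by
    have := List.of_mem_filter hx
    simpa using this
  exact h1 (h0 x hx2)

lemma pvPend_mem (P : Nat) (d : List Int) (rd : List Nat) (hP : ∀ i ∈ rd, i < P) (x : Nat) :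
    x ∈ pvPend P d rd ↔ (x < P ∧ (d.getD x 0 ≠ 0 ∨ x ∈ rd)) := by
  unfold pvPend
  simp only [List.mem_append, List.mem_filter, List.mem_range, decide_eq_true_eq]
  constructor
  · rintro (⟨h1, h2⟩ | h1)
    · exact ⟨h1, Or.inl h2⟩
    · exact ⟨hP x h1, Or.inr h1⟩
  · rintro ⟨h1, h2 | h2⟩
    · exact Or.inl ⟨h1, h2⟩
    · exact Or.inr h2

lemma pvCnt_pos (request : List (List Int)) (R : Nat) (w : List Int) (k j : Nat)
    (hj : j < R) (hk : w.getD j 0 < (request.getD k []).getD j 0) : pvCnt request R w k ≠ 0 := by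
  unfold pvCnt
  have : 0 < (List.range R).countP (fun j' => decide (w.getD j' 0 < (request.getD k []).getD j' 0)) := by
    rw [List.countP_pos_iff]
    exact ⟨j, List.mem_range.mpr hj, by simpa using hk⟩
  omega

-- one `for j in range(R)` step of a pop preserves the invariant, only moves processes
-- from blocked to ready, and raises work at j by the released amount
lemma pvRelB_inv (request allocated : List (List Int)) (P R : Nat) (hA : pvNN allocated)
    (i j : Nat) (hj : j < R) (w d : List Int) (ws : List (List Nat)) (rd : List Nat)
    (hinv : pvInv request P R (w, d, ws, rd)) :
    pvInv request P R (pvRelB request allocated i (w, d, ws, rd) j) ∧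
    (pvPend P (pvRelB request allocated i (w, d, ws, rd) j).2.1
        (pvRelB request allocated i (w, d, ws, rd) j).2.2.2).Perm (pvPend P d rd) ∧
    (pvRelB request allocated i (w, d, ws, rd) j).1
      = (if (allocated.getD i []).getD j 0 ≠ 0
          then w.set j (w.getD j 0 + (allocated.getD i []).getD j 0) else w) := by
  obtain ⟨h1, h2, h3, h4, h5, h6, h7⟩ := hinv
  dsimp only at h1 h2 h3 h4 h5 h6 h7
  by_cases ha : (allocated.getD i []).getD j 0 ≠ 0
  case neg =>
    have hS : pvRelB request allocated i (w, d, ws, rd) j = (w, d, ws, rd) := by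
      unfold pvRelB
      rw [if_neg ha]
    rw [hS, if_neg ha]
    exact ⟨⟨h1, h2, h3, h4, h5, h6, h7⟩, List.Perm.refl _, rfl⟩
  case pos =>
    have hapos : 0 < (allocated.getD i []).getD j 0 := by
      have := hA i j
      omega
    have hmono : w.getD j 0 ≤ w.getD j 0 + (allocated.getD i []).getD j 0 := by omega
    have hwl : ws.getD j [] = (List.range P).filter
        (fun k => decide (w.getD j 0 < (request.getD k []).getD j 0)) := h5 j hj
    have hwlnd : (ws.getD j []).Nodup := by
      rw [hwl]; exact (List.nodup_range).filter _
    have hwlm : ∀ k, k ∈ ws.getD j [] ↔ (k < P ∧ w.getD j 0 < (request.getD k []).getD j 0) := by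
      intro k
      rw [hwl]
      simp [List.mem_filter]
    have hwlt : ∀ k ∈ ws.getD j [], k < d.length := by
      intro k hk
      rw [h2]
      exact ((hwlm k).mp hk).1
    obtain ⟨c1, c2, c3, c4, c5⟩ :=
      pvScan_corr request j (w.getD j 0 + (allocated.getD i []).getD j 0)
        (ws.getD j []) d rd [] hwlnd hwlt
    have hS : pvRelB request allocated i (w, d, ws, rd) j
        = (w.set j (w.getD j 0 + (allocated.getD i []).getD j 0),
           ((ws.getD j []).foldl (pvScanB request j (w.getD j 0 + (allocated.getD i []).getD j 0)) (d, rd, [])).1,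
           ws.set j ((ws.getD j []).foldl (pvScanB request j (w.getD j 0 + (allocated.getD i []).getD j 0)) (d, rd, [])).2.2,
           ((ws.getD j []).foldl (pvScanB request j (w.getD j 0 + (allocated.getD i []).getD j 0)) (d, rd, [])).2.1) := by
      unfold pvRelB
      rw [if_pos ha]
    set wj := w.getD j 0 + (allocated.getD i []).getD j 0 with hwj
    set t := (ws.getD j []).foldl (pvScanB request j wj) (d, rd, []) with ht
    -- deficits after the scan, for every k < P
    have hdall : ∀ k, k < P → t.1.getD k 0 = (pvCnt request R (w.set j wj) k : Int) := by
      intro k hk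
      rw [pvCnt_set request R w j wj hj h1 hmono k]
      by_cases hkwl : k ∈ ws.getD j []
      · have hunsat : w.getD j 0 < (request.getD k []).getD j 0 := ((hwlm k).mp hkwl).2
        rw [c3 k hkwl, h4 k hk]
        by_cases hsat : (request.getD k []).getD j 0 ≤ wj
        · rw [if_pos hsat, if_pos ⟨hunsat, hsat⟩]
        · rw [if_neg hsat, if_neg (fun hc => hsat hc.2)]
      · have hsat0 : ¬ w.getD j 0 < (request.getD k []).getD j 0 := by
          intro hc
          exact hkwl ((hwlm k).mpr ⟨hk, hc⟩)
        rw [c2 k hkwl, h4 k hk, if_neg (fun hc => hsat0 hc.1)]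
        omega
    refine ⟨⟨?_, ?_, ?_, ?_, ?_, ?_, ?_⟩, ?_, ?_⟩
    · rw [hS]; simpa using h1
    · rw [hS]; dsimp only; rw [c1]; exact h2
    · rw [hS]; simpa using h3
    · rw [hS]; dsimp only
      exact hdall
    · rw [hS]; dsimp only
      intro j' hj'
      by_cases hjj : j' = j
      · subst hjj
        have hws : j' < ws.length := by omega
        rw [pvGetD_set_self' ws j' _ [] hws, c4, List.nil_append, hwl, List.filter_filter]
        rw [pvGetD_set_self w j' wj (by omega)]
        refine List.filter_congr ?_
        intro x _
        by_cases hx : wj < (request.getD x []).getD j' 0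
        · have h2x : w.getD j' 0 < (request.getD x []).getD j' 0 := by omega
          simp only [decide_eq_true hx, decide_eq_true h2x, Bool.and_true, Bool.true_and]
        · simp only [decide_eq_false hx, Bool.and_false, Bool.false_and]
      · rw [pvGetD_set_ne' ws j j' _ [] (fun h => hjj h.symm), h5 j' hj']
        rw [pvGetD_set_ne w j j' wj (fun h => hjj h.symm)]
    · rw [hS]; dsimp only
      rw [c5]
      refine List.Nodup.append h6 ((hwlnd).filter _) ?_
      intro x hx hx2
      have hx1 : d.getD x 0 = 0 := (h7 x hx).2
      have := List.of_mem_filter hx2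
      simp only [decide_eq_true_eq] at this
      omega
    · rw [hS]; dsimp only
      rw [c5]
      intro x hx
      rcases List.mem_append.mp hx with hx | hx
      · obtain ⟨hxP, hx0⟩ := h7 x hx
        have hxwl : x ∉ ws.getD j [] := by
          intro hc
          have hunsat := ((hwlm x).mp hc).2
          have := pvCnt_pos request R w x j hj hunsat
          have := h4 x hxP
          omega
        rw [c2 x hxwl]
        exact ⟨hxP, hx0⟩
      · have hxwl := List.mem_of_mem_filter hx
        have hcond := List.of_mem_filter hx
        simp only [decide_eq_true_eq] at hcond
        refine ⟨((hwlm x).mp hxwl).1, ?_⟩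
        rw [c3 x hxwl, if_pos hcond.1, hcond.2]
        omega
    · -- the pending set is only rearranged
      rw [hS]; dsimp only
      have hnd1 : (pvPend P t.1 t.2.1).Nodup := by
        refine pvPend_nodup P t.1 t.2.1 ?_ ?_
        · rw [c5]
          refine List.Nodup.append h6 ((hwlnd).filter _) ?_
          intro x hx hx2
          have hx1 : d.getD x 0 = 0 := (h7 x hx).2
          have := List.of_mem_filter hx2
          simp only [decide_eq_true_eq] at this
          omega
        · rw [c5]
          intro x hx
          rcases List.mem_append.mp hx with hx | hx
          · obtain ⟨hxP, hx0⟩ := h7 x hx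
            have hxwl : x ∉ ws.getD j [] := by
              intro hc
              have hunsat := ((hwlm x).mp hc).2
              have := pvCnt_pos request R w x j hj hunsat
              have := h4 x hxP
              omega
            rw [c2 x hxwl]
            exact hx0
          · have hxwl := List.mem_of_mem_filter hx
            have hcond := List.of_mem_filter hx
            simp only [decide_eq_true_eq] at hcond
            rw [c3 x hxwl, if_pos hcond.1, hcond.2]
            omega
      have hnd2 : (pvPend P d rd).Nodup := pvPend_nodup P d rd h6 (fun x hx => (h7 x hx).2)
      refine pvPerm_of_mem_iff hnd1 hnd2 ?_
      intro x
      have hm1 : ∀ y ∈ t.2.1, y < P := by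
        intro y hy
        rw [c5] at hy
        rcases List.mem_append.mp hy with hy | hy
        · exact (h7 y hy).1
        · exact ((hwlm y).mp (List.mem_of_mem_filter hy)).1
      rw [pvPend_mem P t.1 t.2.1 hm1 x, pvPend_mem P d rd (fun y hy => (h7 y hy).1) x]
      constructor
      · rintro ⟨hxP, hx | hx⟩
        · -- still blocked after the scan: was blocked before
          refine ⟨hxP, Or.inl ?_⟩
          by_cases hkwl : x ∈ ws.getD j []
          · have := h4 x hxP
            have hcp := pvCnt_pos request R w x j hj ((hwlm x).mp hkwl).2
            omega
          · rw [c2 x hkwl] at hx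
            exact hx
        · rw [c5] at hx
          rcases List.mem_append.mp hx with hx | hx
          · exact ⟨hxP, Or.inr hx⟩
          · have hcond := List.of_mem_filter hx
            simp only [decide_eq_true_eq] at hcond
            refine ⟨hxP, Or.inl ?_⟩
            omega
      · rintro ⟨hxP, hx | hx⟩
        · -- blocked before: still blocked, or newly readied
          by_cases hkwl : x ∈ ws.getD j []
          · by_cases hsat : (request.getD x []).getD j 0 ≤ wj
            · by_cases h1x : d.getD x 0 = 1
              · refine ⟨hxP, Or.inr ?_⟩
                rw [c5]
                refine List.mem_append.mpr (Or.inr ?_)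
                exact List.mem_filter.mpr ⟨hkwl, decide_eq_true ⟨hsat, h1x⟩⟩
              · refine ⟨hxP, Or.inl ?_⟩
                rw [c3 x hkwl, if_pos hsat]
                omega
            · refine ⟨hxP, Or.inl ?_⟩
              rw [c3 x hkwl, if_neg hsat]
              omega
          · refine ⟨hxP, Or.inl ?_⟩
            rw [c2 x hkwl]
            exact hx
        · refine ⟨hxP, Or.inr ?_⟩
          rw [c5]
          exact List.mem_append.mpr (Or.inl hx)
    · rw [hS]
      rw [if_pos ha]

-- ---- B-side: a whole pop (fold over range R) ----
lemma pvRelB_fold (request allocated : List (List Int)) (P R : Nat) (hA : pvNN allocated) (i : Nat) :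
    ∀ (js : List Nat) (w d : List Int) (ws : List (List Nat)) (rd : List Nat),
      (∀ j ∈ js, j < R) → pvInv request P R (w, d, ws, rd) →
      pvInv request P R (js.foldl (pvRelB request allocated i) (w, d, ws, rd)) ∧
      (pvPend P (js.foldl (pvRelB request allocated i) (w, d, ws, rd)).2.1
          (js.foldl (pvRelB request allocated i) (w, d, ws, rd)).2.2.2).Perm (pvPend P d rd) ∧
      (js.foldl (pvRelB request allocated i) (w, d, ws, rd)).1
        = js.foldl (fun v j => if (allocated.getD i []).getD j 0 ≠ 0
            then v.set j (v.getD j 0 + (allocated.getD i []).getD j 0) else v) w := by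
  intro js
  induction js with
  | nil => intro w d ws rd _ hinv; exact ⟨hinv, List.Perm.refl _, rfl⟩
  | cons j0 tl ih =>
    intro w d ws rd hlt hinv
    obtain ⟨hinv1, hperm1, hw1⟩ :=
      pvRelB_inv request allocated P R hA i j0 (hlt j0 (List.mem_cons_self ..)) w d ws rd hinv
    simp only [List.foldl_cons]
    obtain ⟨ih1, ih2, ih3⟩ := ih (pvRelB request allocated i (w, d, ws, rd) j0).1
      (pvRelB request allocated i (w, d, ws, rd) j0).2.1
      (pvRelB request allocated i (w, d, ws, rd) j0).2.2.1
      (pvRelB request allocated i (w, d, ws, rd) j0).2.2.2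
      (fun j hj => hlt j (List.mem_cons_of_mem _ hj)) hinv1
    refine ⟨ih1, ih2.trans hperm1, ?_⟩
    rw [ih3, hw1]

lemma pvWUpd_spec (allocated : List (List Int)) (i : Nat) :
    ∀ (m : Nat) (w : List Int), m ≤ w.length →
      ((List.range m).foldl (fun v j => if (allocated.getD i []).getD j 0 ≠ 0
          then v.set j (v.getD j 0 + (allocated.getD i []).getD j 0) else v) w).length = w.length ∧
      ∀ j, ((List.range m).foldl (fun v j => if (allocated.getD i []).getD j 0 ≠ 0
          then v.set j (v.getD j 0 + (allocated.getD i []).getD j 0) else v) w).getD j 0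
          = if j < m then w.getD j 0 + (allocated.getD i []).getD j 0 else w.getD j 0 := by
  intro m
  induction m with
  | zero =>
    intro w _
    refine ⟨rfl, fun j => by simp⟩
  | succ m ihm =>
    intro w hm
    obtain ⟨l1, g1⟩ := ihm w (by omega)
    rw [List.range_succ, List.foldl_append]
    simp only [List.foldl_cons, List.foldl_nil]
    set r := (List.range m).foldl (fun v j => if (allocated.getD i []).getD j 0 ≠ 0
        then v.set j (v.getD j 0 + (allocated.getD i []).getD j 0) else v) w with hr
    have hmr : m < r.length := by omega
    by_cases ha : (allocated.getD i []).getD m 0 ≠ 0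
    · rw [if_pos ha]
      refine ⟨by simpa using l1, ?_⟩
      intro j
      by_cases hjm : j = m
      · subst hjm
        rw [pvGetD_set_self r j _ hmr, g1 j, if_neg (by omega), if_pos (by omega)]
      · rw [pvGetD_set_ne r m j _ (fun h => hjm h.symm), g1 j]
        by_cases hj : j < m
        · rw [if_pos hj, if_pos (by omega)]
        · rw [if_neg hj, if_neg (by omega)]
    · rw [if_neg ha]
      refine ⟨l1, ?_⟩
      intro j
      rw [g1 j]
      have ha0 : (allocated.getD i []).getD m 0 = 0 := by omega
      by_cases hj : j < m
      · rw [if_pos hj, if_pos (by omega)]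
      · by_cases hjm : j = m
        · subst hjm
          rw [if_neg hj, if_pos (by omega), ha0]
          omega
        · rw [if_neg hj, if_neg (by omega)]

lemma pvWUpd_rel (allocated : List (List Int)) (R i : Nat) (w : List Int) (hw : w.length = R) :
    (List.range R).foldl (fun v j => if (allocated.getD i []).getD j 0 ≠ 0
        then v.set j (v.getD j 0 + (allocated.getD i []).getD j 0) else v) w
      = pvRel allocated R w i := by
  obtain ⟨l1, g1⟩ := pvWUpd_spec allocated i R w (by omega)
  apply List.ext_getElem
  · rw [l1, hw]
    simp [pvRel]
  · intro n h1 h2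
    have hn : n < R := by
      have : (pvRel allocated R w i).length = R := by simp [pvRel]
      omega
    rw [← List.getD_eq_getElem _ 0 h1, ← List.getD_eq_getElem _ 0 h2, g1 n, if_pos hn,
        pvRel_getD allocated R w i n hn]

-- ---- B-side: the whole `while ready` loop ----
lemma pvLoopN_surv (request allocated : List (List Int)) (P R : Nat) (hA : pvNN allocated) :
    ∀ (fuel : Nat) (w d : List Int) (ws : List (List Nat)) (rd : List Nat),
      pvInv request P R (w, d, ws, rd) → (pvPend P d rd).length ≤ fuel →
      ((List.range P).filter (fun x => decide ((pvLoopN request allocated R fuel w d ws rd).getD x 0 ≠ 0))).Perm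
        (pvSurv request allocated R w (pvPend P d rd)) := by
  intro fuel
  induction fuel with
  | zero =>
    intro w d ws rd hinv hlen
    have hpend : pvPend P d rd = [] := List.eq_nil_of_length_eq_zero (by omega)
    show ((List.range P).filter (fun x => decide (d.getD x 0 ≠ 0))).Perm _
    rw [hpend, pvSurv_stuck request allocated R w [] (fun x hx => absurd hx (List.not_mem_nil))]
    unfold pvPend at hpend
    obtain ⟨hb, _⟩ := List.append_eq_nil_iff.mp hpend
    rw [hb]
  | succ fuel ihf =>
    intro w d ws rd hinv hlen
    have hinv' := hinv
    obtain ⟨h1, h2, h3, h4, h5, h6, h7⟩ := hinv'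
    dsimp only at h1 h2 h3 h4 h5 h6 h7
    cases hrd : rd.getLast? with
    | none =>
      have hrdnil : rd = [] := by
        cases rd with
        | nil => rfl
        | cons a t => simp at hrd
      subst hrdnil
      have hL : pvLoopN request allocated R (fuel+1) w d ws [] = d := rfl
      rw [hL]
      have hstuck : ∀ x ∈ pvPend P d [], pvElig request R w x = false := by
        intro x hx
        unfold pvPend at hx
        rw [List.append_nil] at hx
        have hxr := List.mem_range.mp (List.mem_of_mem_filter hx)
        have hxd := List.of_mem_filter hx
        simp only [decide_eq_true_eq] at hxd
        cases he : pvElig request R w x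
        · rfl
        · exfalso
          have := (pvCnt_zero_iff request R w x).mpr he
          have := h4 x hxr
          omega
      rw [pvSurv_stuck request allocated R w _ hstuck]
      unfold pvPend
      rw [List.append_nil]
    | some i =>
      obtain ⟨rd0, rfl⟩ := List.getLast?_eq_some_iff.mp hrd
      have hdrop : (rd0 ++ [i]).dropLast = rd0 := List.dropLast_concat
      have hstep : pvLoopN request allocated R (fuel+1) w d ws (rd0 ++ [i])
          = pvLoopN request allocated R fuel
              ((List.range R).foldl (pvRelB request allocated i) (w, d, ws, rd0)).1
              ((List.range R).foldl (pvRelB request allocated i) (w, d, ws, rd0)).2.1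
              ((List.range R).foldl (pvRelB request allocated i) (w, d, ws, rd0)).2.2.1
              ((List.range R).foldl (pvRelB request allocated i) (w, d, ws, rd0)).2.2.2 := by
        conv_lhs => rw [pvLoopN]
        rw [hrd, hdrop]
      obtain ⟨hiP, hid0⟩ := h7 i (by simp)
      have hnd0 : rd0.Nodup := (List.nodup_append.mp h6).1
      have hinotrd0 : i ∉ rd0 := by
        intro hc
        have hdis := List.disjoint_of_nodup_append h6 hc
        simp at hdis
      have hinv0 : pvInv request P R (w, d, ws, rd0) :=
        ⟨h1, h2, h3, h4, h5, hnd0, fun x hx => h7 x (List.mem_append_left _ hx)⟩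
      obtain ⟨hinvS, hpermS, hwS⟩ := pvRelB_fold request allocated P R hA i
        (List.range R) w d ws rd0 (fun j hj => List.mem_range.mp hj) hinv0
      rw [pvWUpd_rel allocated R i w h1] at hwS
      have helig : pvElig request R w i = true := by
        have hcnt := h4 i hiP
        have : pvCnt request R w i = 0 := by omega
        exact (pvCnt_zero_iff request R w i).mp this
      have hpe : pvPend P d (rd0 ++ [i]) = pvPend P d rd0 ++ [i] := by
        unfold pvPend
        rw [List.append_assoc]
      have hndp : (pvPend P d (rd0 ++ [i])).Nodup :=
        pvPend_nodup P d _ h6 (fun x hx => (h7 x hx).2)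
      have hmemi : i ∈ pvPend P d (rd0 ++ [i]) := by
        rw [hpe]
        exact List.mem_append_right _ (by simp)
      have hinot0 : i ∉ pvPend P d rd0 := by
        rw [pvPend_mem P d rd0 (fun y hy => (h7 y (List.mem_append_left _ hy)).1) i]
        rintro ⟨_, hc | hc⟩
        · exact hc hid0
        · exact hinotrd0 hc
      have herase : (pvPend P d (rd0 ++ [i])).erase i = pvPend P d rd0 := by
        rw [hpe, List.erase_append_right _ hinot0, List.erase_cons_head, List.append_nil]
      have e1 : pvSurv request allocated R w (pvPend P d (rd0 ++ [i]))
          = pvSurv request allocated R (pvRel allocated R w i) (pvPend P d rd0) := by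
        rw [pvSurv_step request allocated R hA (pvPend P d (rd0 ++ [i])).length _ w i
              le_rfl hndp hmemi helig, herase]
      have hnd00 : (pvPend P d rd0).Nodup :=
        pvPend_nodup P d rd0 hnd0 (fun x hx => (h7 x (List.mem_append_left _ hx)).2)
      have p2 := pvSurv_perm request allocated R hA (pvPend P d rd0).length
        (pvPend P d rd0)
        (pvPend P
          ((List.range R).foldl (pvRelB request allocated i) (w, d, ws, rd0)).2.1
          ((List.range R).foldl (pvRelB request allocated i) (w, d, ws, rd0)).2.2.2)
        (pvRel allocated R w i) le_rfl hpermS.symm hnd00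
      have hlen' : (pvPend P
          ((List.range R).foldl (pvRelB request allocated i) (w, d, ws, rd0)).2.1
          ((List.range R).foldl (pvRelB request allocated i) (w, d, ws, rd0)).2.2.2).length ≤ fuel := by
        have hl1 := hpermS.length_eq
        have hl2 : (pvPend P d (rd0 ++ [i])).length = (pvPend P d rd0).length + 1 := by
          rw [hpe, List.length_append, List.length_singleton]
        omega
      have hmain := ihf
        ((List.range R).foldl (pvRelB request allocated i) (w, d, ws, rd0)).1
        ((List.range R).foldl (pvRelB request allocated i) (w, d, ws, rd0)).2.1
        ((List.range R).foldl (pvRelB request allocated i) (w, d, ws, rd0)).2.2.1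
        ((List.range R).foldl (pvRelB request allocated i) (w, d, ws, rd0)).2.2.2
        hinvS hlen'
      rw [hstep, hwS, e1]
      rw [hwS] at hmain
      exact hmain.trans p2.symm

-- ---- B-side: the init double loop builds counters and waiter lists ----
lemma pvInitStep_fold (request : List (List Int)) (w : List Int) (i : Nat) :
    ∀ (js : List Nat) (s : List Int × List (List Nat)), js.Nodup →
      (∀ j ∈ js, j < s.2.length) → i < s.1.length →
      (js.foldl (pvInitStep request w i) s).1.length = s.1.length ∧
      (js.foldl (pvInitStep request w i) s).2.length = s.2.length ∧
      (js.foldl (pvInitStep request w i) s).1.getD i 0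
        = s.1.getD i 0 + (js.countP (fun j => decide (w.getD j 0 < (request.getD i []).getD j 0)) : Int) ∧
      (∀ x, x ≠ i → (js.foldl (pvInitStep request w i) s).1.getD x 0 = s.1.getD x 0) ∧
      (∀ j, (js.foldl (pvInitStep request w i) s).2.getD j []
        = if j ∈ js ∧ w.getD j 0 < (request.getD i []).getD j 0
          then s.2.getD j [] ++ [i] else s.2.getD j []) := by
  intro js
  induction js with
  | nil =>
    intro s _ _ _
    refine ⟨rfl, rfl, by simp, fun x _ => rfl, fun j => by simp⟩
  | cons j0 tl ih =>
    intro s hnd hjs hi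
    obtain ⟨d, ws⟩ := s
    dsimp only at hjs hi ⊢
    have hj0tl : j0 ∉ tl := (List.nodup_cons.mp hnd).1
    simp only [List.foldl_cons]
    by_cases hu : w.getD j0 0 < (request.getD i []).getD j0 0
    · have hstep : pvInitStep request w i (d, ws) j0
          = (d.set i (d.getD i 0 + 1), ws.set j0 (ws.getD j0 [] ++ [i])) := by
        unfold pvInitStep
        rw [if_pos hu]
      rw [hstep]
      obtain ⟨c1, c2, c3, c4, c5⟩ := ih (d.set i (d.getD i 0 + 1), ws.set j0 (ws.getD j0 [] ++ [i])) hnd.of_cons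
        (fun j hj => by simpa using hjs j (List.mem_cons_of_mem _ hj)) (by simpa using hi)
      refine ⟨by simpa using c1, by simpa using c2, ?_, ?_, ?_⟩
      · rw [c3, pvGetD_set_self d i _ hi, List.countP_cons, decide_eq_true hu]
        simp only [if_true]
        push_cast
        ring
      · intro x hx
        rw [c4 x hx, pvGetD_set_ne d i x _ (fun h => hx h.symm)]
      · intro j
        rw [c5 j]
        by_cases hjtl : j ∈ tl ∧ w.getD j 0 < (request.getD i []).getD j 0
        · rw [if_pos hjtl, if_pos ⟨List.mem_cons_of_mem _ hjtl.1, hjtl.2⟩]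
          have hne : j0 ≠ j := fun h => hj0tl (h ▸ hjtl.1)
          rw [pvGetD_set_ne' ws j0 j _ [] hne]
        · rw [if_neg hjtl]
          by_cases hjj0 : j = j0
          · subst hjj0
            rw [if_pos ⟨List.mem_cons_self .., hu⟩,
                pvGetD_set_self' ws j _ [] (hjs j (List.mem_cons_self ..))]
          · have hno : ¬ (j ∈ j0 :: tl ∧ w.getD j 0 < (request.getD i []).getD j 0) := by
              rintro ⟨hm, hlt⟩
              rcases List.mem_cons.mp hm with h | h
              · exact hjj0 h
              · exact hjtl ⟨h, hlt⟩
            rw [if_neg hno, pvGetD_set_ne' ws j0 j _ [] (fun h => hjj0 h.symm)]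
    · have hstep : pvInitStep request w i (d, ws) j0 = (d, ws) := by
        unfold pvInitStep
        rw [if_neg hu]
      rw [hstep]
      obtain ⟨c1, c2, c3, c4, c5⟩ := ih (d, ws) hnd.of_cons
        (fun j hj => hjs j (List.mem_cons_of_mem _ hj)) hi
      refine ⟨c1, c2, ?_, c4, ?_⟩
      · rw [c3, List.countP_cons, decide_eq_false hu]
        simp
      · intro j
        rw [c5 j]
        by_cases hjtl : j ∈ tl ∧ w.getD j 0 < (request.getD i []).getD j 0
        · rw [if_pos hjtl, if_pos ⟨List.mem_cons_of_mem _ hjtl.1, hjtl.2⟩]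
        · have hno : ¬ (j ∈ j0 :: tl ∧ w.getD j 0 < (request.getD i []).getD j 0) := by
            rintro ⟨hm, hlt⟩
            rcases List.mem_cons.mp hm with h | h
            · exact hu (h ▸ hlt)
            · exact hjtl ⟨h, hlt⟩
          rw [if_neg hjtl, if_neg hno]

lemma pvInitB_spec (request : List (List Int)) (w : List Int) (P R : Nat) :
    ∀ m, m ≤ P →
      ((List.range m).foldl (fun s i => pvInitInner request w R i s)
          (List.replicate P (0 : Int), List.replicate R ([] : List Nat))).1.length = P ∧
      ((List.range m).foldl (fun s i => pvInitInner request w R i s)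
          (List.replicate P (0 : Int), List.replicate R ([] : List Nat))).2.length = R ∧
      (∀ x, x < P → ((List.range m).foldl (fun s i => pvInitInner request w R i s)
          (List.replicate P (0 : Int), List.replicate R ([] : List Nat))).1.getD x 0
          = if x < m then (pvCnt request R w x : Int) else 0) ∧
      (∀ j, j < R → ((List.range m).foldl (fun s i => pvInitInner request w R i s)
          (List.replicate P (0 : Int), List.replicate R ([] : List Nat))).2.getD j []
          = (List.range m).filter (fun k => decide (w.getD j 0 < (request.getD k []).getD j 0))) := by
  intro m
  induction m with
  | zero =>
    intro _
    refine ⟨by simp, by simp, ?_, ?_⟩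
    · intro x hx
      rw [if_neg (by omega)]
      simp [List.getD, List.getElem?_replicate, hx]
    · intro j hj
      simp [List.getD, List.getElem?_replicate, hj]
  | succ m ihm =>
    intro hm
    obtain ⟨c1, c2, c3, c4⟩ := ihm (by omega)
    rw [List.range_succ, List.foldl_append]
    simp only [List.foldl_cons, List.foldl_nil]
    show (pvInitInner request w R m _).1.length = P ∧ _
    unfold pvInitInner at c1 c2 c3 c4 ⊢
    obtain ⟨d1, d2, d3, d4, d5⟩ := pvInitStep_fold request w m (List.range R)
      ((List.range m).foldl (fun s i => (List.range R).foldl (pvInitStep request w i) s)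
          (List.replicate P (0 : Int), List.replicate R ([] : List Nat)))
      List.nodup_range (fun j hj => by rw [c2]; exact List.mem_range.mp hj) (by rw [c1]; omega)
    refine ⟨by rw [d1, c1], by rw [d2, c2], ?_, ?_⟩
    · intro x hx
      by_cases hxm : x = m
      · subst hxm
        rw [d3, c3 x hx, if_neg (lt_irrefl _), if_pos (by omega), zero_add]
        rfl
      · rw [d4 x hxm, c3 x hx]
        by_cases hxm' : x < m
        · rw [if_pos hxm', if_pos (by omega)]
        · rw [if_neg hxm', if_neg (by omega)]
    · intro j hj
      rw [d5 j, c4 j hj, List.filter_append]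
      have hjm : j ∈ List.range R := List.mem_range.mpr hj
      by_cases hu : w.getD j 0 < (request.getD m []).getD j 0
      · rw [if_pos ⟨hjm, hu⟩]
        simp only [List.filter_cons, List.filter_nil, decide_eq_true hu, if_true]
      · rw [if_neg (fun hc => hu hc.2)]
        simp only [List.filter_cons, List.filter_nil, decide_eq_false hu,
          Bool.false_eq_true, if_false, List.append_nil]

lemma pvInitB_props (request : List (List Int)) (w : List Int) (P R : Nat) :
    (pvInitB request w P R).1.length = P ∧ (pvInitB request w P R).2.length = R ∧
    (∀ x, x < P → (pvInitB request w P R).1.getD x 0 = (pvCnt request R w x : Int)) ∧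
    (∀ j, j < R → (pvInitB request w P R).2.getD j []
        = (List.range P).filter (fun k => decide (w.getD j 0 < (request.getD k []).getD j 0))) := by
  obtain ⟨c1, c2, c3, c4⟩ := pvInitB_spec request w P R P le_rfl
  exact ⟨c1, c2, fun x hx => by have h := c3 x hx; rwa [if_pos hx] at h, c4⟩

-- ===== VERDICT (by name: the statement is the Claim_ definition above) =====
theorem detect_deadlock_spec : Claim_equal_detect_deadlock := by
  intro available allocated request _ hpre
  have hA : pvNN allocated := pvPre_NN available allocated request hpre
  show detect_deadlock available allocated request = detect_deadlock_alt available allocated request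
  rw [pvA_eq_sweep available allocated request,
      pvSweep_surv request allocated available.length hA (allocated.length + 1) available
        (List.range allocated.length) List.nodup_range (by simp)]
  simp only [detect_deadlock_alt]
  obtain ⟨c1, c2, c3, c4⟩ := pvInitB_props request available allocated.length available.length
  set B0 := pvInitB request available allocated.length available.length with hB0
  set rdy := (List.range allocated.length).filter (fun i => decide (B0.1.getD i 0 = 0)) with hrdy
  have hready : ∀ x ∈ rdy, x < allocated.length ∧ B0.1.getD x 0 = 0 := by
    intro x hx
    rw [hrdy] at hx
    have h1 := List.mem_range.mp (List.mem_of_mem_filter hx)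
    have h2 := List.of_mem_filter hx
    simp only [decide_eq_true_eq] at h2
    exact ⟨h1, h2⟩
  have hinv : pvInv request allocated.length available.length (available, B0.1, B0.2, rdy) :=
    ⟨rfl, c1, c2, c3, c4, by rw [hrdy]; exact (List.nodup_range).filter _, hready⟩
  have hpnd : (pvPend allocated.length B0.1 rdy).Nodup :=
    pvPend_nodup _ _ _ (by rw [hrdy]; exact (List.nodup_range).filter _)
      (fun x hx => (hready x hx).2)
  have hpermR : (pvPend allocated.length B0.1 rdy).Perm (List.range allocated.length) := by
    refine pvPerm_of_mem_iff hpnd List.nodup_range ?_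
    intro x
    rw [pvPend_mem _ _ _ (fun y hy => (hready y hy).1) x]
    simp only [List.mem_range]
    constructor
    · rintro ⟨h, _⟩
      exact h
    · intro h
      by_cases h0 : B0.1.getD x 0 = 0
      · refine ⟨h, Or.inr ?_⟩
        rw [hrdy]
        exact List.mem_filter.mpr ⟨List.mem_range.mpr h, decide_eq_true h0⟩
      · exact ⟨h, Or.inl h0⟩
  have hloop := pvLoopN_surv request allocated allocated.length available.length hA
    allocated.length available B0.1 B0.2 rdy hinv
    (le_of_eq (by rw [hpermR.length_eq, List.length_range]))
  have hsurvp := pvSurv_perm request allocated available.length hA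
    (pvPend allocated.length B0.1 rdy).length (pvPend allocated.length B0.1 rdy)
    (List.range allocated.length) available le_rfl hpermR hpnd
  have hchain := hloop.trans hsurvp
  have hsubA := pvSurv_sublist request allocated available.length
    (List.range allocated.length).length (List.range allocated.length) available le_rfl
  have hsA : (pvSurv request allocated available.length available
      (List.range allocated.length)).Pairwise (· ≤ ·) :=
    (List.Pairwise.sublist hsubA List.pairwise_lt_range).imp le_of_lt
  have hsB : ((List.range allocated.length).filter (fun x => decide ((pvLoopN request allocated
      available.length allocated.length available B0.1 B0.2 rdy).getD x 0 ≠ 0))).Pairwise (· ≤ ·) :=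
    (List.Pairwise.sublist List.filter_sublist List.pairwise_lt_range).imp le_of_lt
  have heq := List.eq_of_perm_of_sorted (fun a b _ _ h1 h2 => Nat.le_antisymm h1 h2) hsB hsA hchain
  rw [heq]
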